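-- pv_equiv track=rewrite | github.com/nacho09021973/RINGEST | ringest/pattern_scan_global_simple.py | _select_candidate_feature_rows
-- ===== SOURCE A (Python) =====
-- from typing import Any
--
-- MAX_CANDIDATE_FEATURES = 6
--
-- def _select_candidate_feature_rows(feature_rows: list[dict[str, Any]]) -> list[dict[str, Any]]:
--     deduped: dict[str, dict[str, Any]] = {}
--     for row in feature_rows:
--         deduped[row["field_name"]] = row
--
--     base_names = set(deduped)
--     selected = [
--         row
--         for row in deduped.values()
--         if not _is_redundant_interval_variant(field_name=row["field_name"], known_fields=base_names)
--     ]
--     selected.sort(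
--         key=lambda row: (
--             row.get("candidate_role") != "numeric_feature",
--             _feature_priority(row["field_name"]),
--             row["field_name"],
--         )
--     )
--     return selected[:MAX_CANDIDATE_FEATURES]
--
-- def _is_redundant_interval_variant(*, field_name: str, known_fields: set[str]) -> bool:
--     suffix_map = {
--         "_ci_low": "",
--         "_ci_high": "",
--         "_lower": "",
--         "_upper": "",
--     }
--     for suffix, replacement in suffix_map.items():
--         if field_name.endswith(suffix):
--             base_name = field_name[: -len(suffix)] + replacement
--             return base_name in known_fields
--     return False
--
-- def _feature_priority(field_name: str) -> tuple[int, int, str]: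
--     normalized = field_name.lower()
--     proxy_penalty = 1 if "proxy" in normalized else 0
--     uncertainty_penalty = 1 if "uncertainty" in normalized else 0
--     return (proxy_penalty, uncertainty_penalty, normalized)
-- ===== SOURCE B (Python) =====
-- MAX_CANDIDATE_FEATURES = 6
--
-- _INTERVAL_SUFFIXES = ("_ci_low", "_ci_high", "_lower", "_upper")
--
--
-- def _row_key(row):
--     name = row["field_name"]
--     normalized = name.lower()
--     return (
--         row.get("candidate_role") != "numeric_feature",
--         (1 if "proxy" in normalized else 0, 1 if "uncertainty" in normalized else 0, normalized),
--         name,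
--     )
--
--
-- def _select_candidate_feature_rows(feature_rows):
--     deduped = {}
--     for row in feature_rows:
--         deduped[row["field_name"]] = row
--
--     # Online top-k selection: keep a sorted list of at most 6 rows instead of
--     # sorting everything and slicing.
--     top = []
--     for row in deduped.values():
--         name = row["field_name"]
--         suffix = next((s for s in _INTERVAL_SUFFIXES if name.endswith(s)), None)
--         if suffix is not None and name[: -len(suffix)] in deduped:
--             continue
--         k = _row_key(row)
--         i = next((j for j, r in enumerate(top) if k < _row_key(r)), len(top))
--         top.insert(i, row)
--         del top[MAX_CANDIDATE_FEATURES:]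
--     return top
-- ===== Notes on version B (the rewrite author's own statement) =====
-- stated objective: alternative
-- what changed: B replaces A's full stable sort of the filtered rows followed by slicing with an online bounded insertion: it scans the deduplicated rows once, keeping only a sorted buffer of at most 6 rows (insert at the first strictly-greater key position, then truncate), and replaces the suffix-map loop plus key-set by a first-matching-suffix lookup against the dict itself.
import Mathlib
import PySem

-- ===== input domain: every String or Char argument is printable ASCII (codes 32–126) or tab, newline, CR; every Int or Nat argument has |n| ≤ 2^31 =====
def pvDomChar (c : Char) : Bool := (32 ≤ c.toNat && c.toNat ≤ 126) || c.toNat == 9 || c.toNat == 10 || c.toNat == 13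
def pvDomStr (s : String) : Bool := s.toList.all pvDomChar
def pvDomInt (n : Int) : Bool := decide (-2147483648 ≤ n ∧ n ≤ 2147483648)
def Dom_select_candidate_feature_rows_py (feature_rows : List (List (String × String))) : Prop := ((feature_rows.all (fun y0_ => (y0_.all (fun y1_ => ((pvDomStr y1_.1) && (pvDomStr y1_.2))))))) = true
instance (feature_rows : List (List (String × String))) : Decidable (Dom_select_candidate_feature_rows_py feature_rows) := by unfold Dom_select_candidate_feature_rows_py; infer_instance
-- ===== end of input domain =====

-- B replaces A's full stable sort + slice by an online bounded insertion (a size-6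
-- ordered buffer maintained while scanning the deduplicated rows), and the
-- suffix-map loop by a first-matching-suffix lookup against the dict itself
-- (objective: alternative / partial selection instead of full sort).

-- ===== PORT A =====
-- The Python sort key is the tuple (bool, (int, int, str), str); featLT below is
-- Python's lexicographic tuple comparison spelled out component by component
-- (False < True on bools, code-point order on strings).
abbrev FeatKey : Type := Bool × (Int × Int × String) × String

def featLT (x y : FeatKey) : Bool :=
  if x.1 = y.1 then
    if x.2.1.1 = y.2.1.1 then
      if x.2.1.2.1 = y.2.1.2.1 then
        if x.2.1.2.2 = y.2.1.2.2 then
          decide (x.2.2 < y.2.2)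
        else decide (x.2.1.2.2 < y.2.1.2.2)
      else decide (x.2.1.2.1 < y.2.1.2.1)
    else decide (x.2.1.1 < y.2.1.1)
  else decide (x.1 < y.1)

-- row["field_name"] (KeyError excluded by Pre_; the default is never used there)
def fieldNameOf (row : List (String × String)) : String :=
  PySem.Dict.getD (PySem.Dict.mk row) "field_name" ""

-- _feature_priority
def featPriority (field_name : String) : Int × Int × String :=
  let normalized := PySem.Str.lower field_name
  ((if PySem.Str.isIn "proxy" normalized then 1 else 0),
    ((if PySem.Str.isIn "uncertainty" normalized then 1 else 0), normalized))

-- the sort-key lambda: (row.get("candidate_role") != "numeric_feature",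
--                       _feature_priority(row["field_name"]), row["field_name"])
def featKey (row : List (String × String)) : FeatKey :=
  (!(PySem.Dict.get? (PySem.Dict.mk row) "candidate_role" == some "numeric_feature"),
    (featPriority (fieldNameOf row), fieldNameOf row))

-- selected.sort(key=…): Python's stable sort, as PySem's stable insertion-sort fold
-- (PySem.List.sorted_eq_foldl_insertBy) — the tuple key is compared by featLT, the
-- Lex product instances being non-executable
def pySortFeat (xs : List (List (String × String))) : List (List (String × String)) :=
  xs.foldl (fun acc x =>
    PySem.List.insertBy (fun a b => featLT (featKey a) (featKey b)) x acc) []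

-- the 'for suffix, replacement in suffix_map.items()' loop of _is_redundant_interval_variant;
-- base_name = field_name[:-len(suffix)] + replacement, and every replacement is "",
-- so the concatenation with "" is dropped (exact)
def suffixLoopA (field_name : String) (known_fields : PySem.Set String) :
    List (String × String) → Bool
  | [] => false
  | (suffix, _replacement) :: rest =>
    if PySem.Str.endswith field_name suffix then
      PySem.Set.contains known_fields
        (PySem.Str.slice field_name none (some (-(PySem.Str.len suffix))))
    else suffixLoopA field_name known_fields rest

-- _is_redundant_interval_variant (suffix_map has insertion order _ci_low, _ci_high, _lower, _upper)
def isRedundantIntervalVariant (field_name : String) (known_fields : PySem.Set String) : Bool :=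
  suffixLoopA field_name known_fields
    [("_ci_low", ""), ("_ci_high", ""), ("_lower", ""), ("_upper", "")]

def select_candidate_feature_rows_py (feature_rows : List (List (String × String))) :
    List (List (String × String)) :=
  let deduped : PySem.Dict String (List (String × String)) :=
    feature_rows.foldl (fun d row => PySem.Dict.insert d (fieldNameOf row) row) PySem.Dict.empty
  let base_names : PySem.Set String := PySem.Set.ofList (PySem.Dict.keys deduped)
  let selected := (PySem.Dict.values deduped).filter
    (fun row => !(isRedundantIntervalVariant (fieldNameOf row) base_names))
  PySem.List.slice (pySortFeat selected) none (some 6)   -- selected.sort(key=…); selected[:6]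

-- ===== PORT B =====
-- i = next((j for j, r in enumerate(top) if k < _row_key(r)), len(top))
def insertPosB (k : FeatKey) : List (List (String × String)) → Nat
  | [] => 0
  | r :: t => if featLT k (featKey r) then 0 else insertPosB k t + 1

def select_candidate_feature_rows_py_alt (feature_rows : List (List (String × String))) :
    List (List (String × String)) :=
  let deduped : PySem.Dict String (List (String × String)) :=
    feature_rows.foldl (fun d row => PySem.Dict.insert d (fieldNameOf row) row) PySem.Dict.empty
  (PySem.Dict.values deduped).foldl (fun top row =>
    let name := fieldNameOf row
    -- suffix = next((s for s in _INTERVAL_SUFFIXES if name.endswith(s)), None)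
    if (match List.find? (fun s => PySem.Str.endswith name s)
          ["_ci_low", "_ci_high", "_lower", "_upper"] with
        | some suffix =>
          PySem.Dict.contains deduped
            (PySem.Str.slice name none (some (-(PySem.Str.len suffix))))
        | none => false) then top   -- continue
    else
      let k := featKey row
      let i := insertPosB k top
      (PySem.List.insert top (i : Int) row).take 6)   -- top.insert(i, row); del top[6:]
    []

-- ===== PRECONDITION & SPEC =====
-- Pre_ excludes exactly the inputs where some row lacks the key "field_name",
-- on which the Python A raises KeyError.
def Pre_select_candidate_feature_rows_py (feature_rows : List (List (String × String))) : Prop :=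
  (feature_rows.all (fun row => PySem.Dict.contains (PySem.Dict.mk row) "field_name")) = true
instance (feature_rows : List (List (String × String))) : Decidable (Pre_select_candidate_feature_rows_py feature_rows) := by unfold Pre_select_candidate_feature_rows_py; infer_instance

def pvWitness_select_candidate_feature_rows_py : (List (List (String × String))) :=
  ([[("field_name", "alpha"), ("candidate_role", "numeric_feature")],
    [("field_name", "alpha_ci_low")]])

def Spec_select_candidate_feature_rows_py (feature_rows : List (List (String × String))) (out : List (List (String × String))) : Prop := out = select_candidate_feature_rows_py_alt feature_rows
instance (feature_rows : List (List (String × String))) (out : List (List (String × String))) : Decidable (Spec_select_candidate_feature_rows_py feature_rows out) := by unfold Spec_select_candidate_feature_rows_py; infer_instance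

-- ===== CLAIM (what is proved, stated in full; the proofs are below) =====
def Claim_equal_select_candidate_feature_rows_py : Prop := ∀ (feature_rows : List (List (String × String))), Dom_select_candidate_feature_rows_py feature_rows → Pre_select_candidate_feature_rows_py feature_rows → Spec_select_candidate_feature_rows_py feature_rows (select_candidate_feature_rows_py feature_rows)

-- ===== LEMMAS AND PROOFS =====

-- B's redundancy test (first matching suffix, membership in the dict) equals A's
-- suffix-map loop against the set of the dict's keys.
lemma red_eq (name : String) (d : PySem.Dict String (List (String × String))) :
    (match List.find? (fun s => PySem.Str.endswith name s)
        ["_ci_low", "_ci_high", "_lower", "_upper"] with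
      | some suffix =>
        PySem.Dict.contains d (PySem.Str.slice name none (some (-(PySem.Str.len suffix))))
      | none => false)
      = isRedundantIntervalVariant name (PySem.Set.ofList (PySem.Dict.keys d)) := by
  have hmem : ∀ b : String,
      PySem.Dict.contains d b
        = PySem.Set.contains (PySem.Set.ofList (PySem.Dict.keys d)) b := by
    intro b
    rw [Bool.eq_iff_iff, PySem.Dict.contains_iff_mem_keys, PySem.Set.contains_iff,
      PySem.Set.mem_ofList]
  simp only [isRedundantIntervalVariant, suffixLoopA, List.find?]
  cases h1 : PySem.Str.endswith name "_ci_low" <;>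
    cases h2 : PySem.Str.endswith name "_ci_high" <;>
      cases h3 : PySem.Str.endswith name "_lower" <;>
        cases h4 : PySem.Str.endswith name "_upper" <;>
          simp [hmem]

-- a foldl that skips the elements passing a test is a foldl over the others
lemma foldl_skip {α β : Type} (p : α → Bool) (g : β → α → β) :
    ∀ (l : List α) (b : β),
      l.foldl (fun acc x => if p x then acc else g acc x) b
        = (l.filter (fun x => !(p x))).foldl g b := by
  intro l
  induction l with
  | nil => intro b; rfl
  | cons x t ih =>
    intro b
    by_cases h : p x = true
    · simp [List.filter, h, ih]
    · simp only [Bool.not_eq_true] at h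
      simp [List.filter, h, ih]

-- position of the left scan is within bounds
lemma insertPosB_le (k : FeatKey) : ∀ (t : List (List (String × String))),
    insertPosB k t ≤ t.length := by
  intro t
  induction t with
  | nil => simp [insertPosB]
  | cons r t ih =>
    simp only [insertPosB]
    by_cases h : featLT k (featKey r) = true
    · simp [h]
    · simp only [Bool.not_eq_true] at h
      simp [h]; omega

-- inserting at the scanned position is exactly the stable insertion step
lemma insert_insertPos_eq_insertBy (x : List (String × String)) :
    ∀ (t : List (List (String × String))),
      PySem.List.insert t ((insertPosB (featKey x) t : Nat) : Int) x
        = PySem.List.insertBy (fun a b => featLT (featKey a) (featKey b)) x t := by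
  intro t
  induction t with
  | nil => rfl
  | cons r t ih =>
    rw [PySem.List.insert_natCast _ _ _ (insertPosB_le _ _)]
    by_cases h : featLT (featKey x) (featKey r) = true
    · simp [insertPosB, h, PySem.List.insertBy]
    · simp only [Bool.not_eq_true] at h
      have hle := insertPosB_le (featKey x) t
      simp only [insertPosB, h, if_false, PySem.List.insertBy, Bool.false_eq_true]
      rw [List.take_succ_cons, List.drop_succ_cons]
      rw [PySem.List.insert_natCast _ _ _ hle] at ih
      simp [ih]

-- take m (y :: take m t) = take m (y :: t)
lemma take_cons_take {α : Type} (m : Nat) (y : α) (t : List α) :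
    List.take m (y :: List.take m t) = List.take m (y :: t) := by
  cases m with
  | zero => rfl
  | succ k =>
    simp only [List.take_succ_cons, List.take_take]
    rw [Nat.min_eq_left (Nat.le_succ k)]

-- truncating before the insertion does not change the truncated result
lemma take_insertBy_take {α : Type} (p : α → α → Bool) (x : α) (n : Nat) :
    ∀ (s : List α),
      (PySem.List.insertBy p x (s.take n)).take n = (PySem.List.insertBy p x s).take n := by
  intro s
  induction s generalizing n with
  | nil => simp
  | cons y t ih =>
    cases n with
    | zero => rfl
    | succ m =>
      simp only [List.take_succ_cons, PySem.List.insertBy]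
      by_cases h : p x y = true
      · simp [h, take_cons_take]
      · simp only [Bool.not_eq_true] at h
        simp [h, List.take_succ_cons, ih]

-- maintaining a truncated buffer through the insertion fold equals truncating the
-- full stable insertion sort at the end
lemma foldl_take_insertBy {α : Type} (p : α → α → Bool) (n : Nat) :
    ∀ (ys : List α),
      ys.foldl (fun acc x => (PySem.List.insertBy p x acc).take n) []
        = (ys.foldl (fun acc x => PySem.List.insertBy p x acc) []).take n := by
  intro ys
  induction ys using List.reverseRecOn with
  | nil => simp
  | append_singleton ys x ih =>
    rw [List.foldl_append, List.foldl_append]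
    simp only [List.foldl_cons, List.foldl_nil]
    rw [ih, take_insertBy_take]

-- the bounded-insertion fold over any list is the truncated stable sort
lemma foldl_bounded_insert_eq (sel : List (List (String × String))) :
    sel.foldl (fun top row =>
        (PySem.List.insert top ((insertPosB (featKey row) top : Nat) : Int) row).take 6) []
      = (pySortFeat sel).take 6 := by
  have hf : (fun (top : List (List (String × String))) row =>
        (PySem.List.insert top ((insertPosB (featKey row) top : Nat) : Int) row).take 6)
      = fun top row =>
        (PySem.List.insertBy (fun a b => featLT (featKey a) (featKey b)) row top).take 6 := by
    funext top row
    rw [insert_insertPos_eq_insertBy]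
  rw [hf, pySortFeat, foldl_take_insertBy]

-- ===== VERDICT (by name: the statement is the Claim_ definition above) =====
theorem select_candidate_feature_rows_py_spec : Claim_equal_select_candidate_feature_rows_py := by
  intro feature_rows _ _
  unfold Spec_select_candidate_feature_rows_py
  unfold select_candidate_feature_rows_py select_candidate_feature_rows_py_alt
  simp only [red_eq]
  rw [foldl_skip, foldl_bounded_insert_eq,
    PySem.List.slice_to _ (by norm_num : (0:Int) ≤ 6)]
  have h6 : (6 : Int).toNat = 6 := rfl
  rw [h6]
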